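-- pv_equiv track=rewrite | github.com/waledezzeldin/FitCoach | SRS/figma/generate_figma_pack.py | web_frame
-- ===== SOURCE A (Python) =====
-- def web_frame(title, sections=None, theme=None):
--     w, h = 1440, 1024
--     t = theme or {}
--     bg = t.get("bg", "#0B1220")
--     surface = t.get("surface", "#121A2A")
--     panel = t.get("panel", "#0F172A")
--     text = t.get("text", "#E5E7EB")
--     muted = t.get("muted", "#94A3B8")
--
--     elems = []
--     elems.append(f'<rect x="0" y="0" width="{w}" height="{h}" fill="{bg}"/>' )
--     # sidebar
--     elems.append(f'<rect x="0" y="0" width="256" height="{h}" fill="{panel}"/>' )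
--     elems.append(f'<text x="24" y="48" fill="{text}" font-size="18" font-family="Inter" font-weight="600">Admin</text>')
--     # header
--     elems.append(f'<rect x="256" y="0" width="{w-256}" height="64" fill="{surface}"/>' )
--     elems.append(f'<text x="280" y="40" fill="{text}" font-size="18" font-family="Inter" font-weight="600">{title}</text>')
--     # content grid
--     y = 88
--     x = 280
--     if not sections:
--         sections = ["Primary panel","Secondary panel","Table / List","Details / Inspector","Actions"]
--     for i, s in enumerate(sections[:6]):
--         elems.append(f'<rect x="{x}" y="{y}" rx="12" ry="12" width="520" height="200" fill="{surface}" stroke="#1F2A40"/>' )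
--         elems.append(f'<text x="{x+16}" y="{y+36}" fill="{muted}" font-size="14" font-family="Inter">{s}</text>')
--         if (i % 2) == 1:
--             y += 216
--             x = 280
--         else:
--             x = 824
--     return elems, w, h
-- ===== SOURCE B (Python) =====
-- def web_frame(title, sections=None, theme=None):
--     w, h = 1440, 1024
--     t = theme or {}
--     bg = t.get("bg", "#0B1220")
--     surface = t.get("surface", "#121A2A")
--     panel = t.get("panel", "#0F172A")
--     text = t.get("text", "#E5E7EB")
--     muted = t.get("muted", "#94A3B8")
--     fixed = [
--         f'<rect x="0" y="0" width="{w}" height="{h}" fill="{bg}"/>',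
--         f'<rect x="0" y="0" width="256" height="{h}" fill="{panel}"/>',
--         f'<text x="24" y="48" fill="{text}" font-size="18" font-family="Inter" font-weight="600">Admin</text>',
--         f'<rect x="256" y="0" width="{w-256}" height="64" fill="{surface}"/>',
--         f'<text x="280" y="40" fill="{text}" font-size="18" font-family="Inter" font-weight="600">{title}</text>',
--     ]
--     secs = sections if sections else ["Primary panel","Secondary panel","Table / List","Details / Inspector","Actions"]
--
--     def card(x, y, s):
--         return [
--             f'<rect x="{x}" y="{y}" rx="12" ry="12" width="520" height="200" fill="{surface}" stroke="#1F2A40"/>',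
--             f'<text x="{x+16}" y="{y+36}" fill="{muted}" font-size="14" font-family="Inter">{s}</text>',
--         ]
--
--     def grid(rest, y):
--         # consume one ROW (up to two cards) per recursive step
--         if not rest:
--             return []
--         if len(rest) == 1:
--             return card(280, y, rest[0])
--         return card(280, y, rest[0]) + card(824, y, rest[1]) + grid(rest[2:], y + 216)
--
--     return fixed + grid(secs[:6], 88), w, h
-- ===== Notes on version B (the rewrite author's own statement) =====
-- stated objective: alternative
-- what changed: B builds the content grid by row-wise recursion: a recursive helper consumes the truncated section list two items at a time (one grid row per call), placing the left card at x=280 and the right at x=824 and advancing y by 216 between calls, instead of A's single per-item loop with mutable x/y accumulators and an end-of-iteration parity branch.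
import Mathlib
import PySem

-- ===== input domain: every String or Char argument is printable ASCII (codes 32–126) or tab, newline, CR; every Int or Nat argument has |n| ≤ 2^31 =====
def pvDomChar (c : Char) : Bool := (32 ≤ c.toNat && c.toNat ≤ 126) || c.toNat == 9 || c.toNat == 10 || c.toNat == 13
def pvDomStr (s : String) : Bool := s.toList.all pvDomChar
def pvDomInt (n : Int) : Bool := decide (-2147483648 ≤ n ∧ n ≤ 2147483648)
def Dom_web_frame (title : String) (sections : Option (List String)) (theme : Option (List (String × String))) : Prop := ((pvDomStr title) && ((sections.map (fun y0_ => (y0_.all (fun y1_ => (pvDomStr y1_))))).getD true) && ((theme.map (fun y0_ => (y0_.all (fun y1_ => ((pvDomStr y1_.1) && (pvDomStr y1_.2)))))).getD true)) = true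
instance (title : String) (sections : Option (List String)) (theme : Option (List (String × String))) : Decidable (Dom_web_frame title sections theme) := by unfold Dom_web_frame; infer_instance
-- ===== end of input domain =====

-- B replaces A's per-item loop with mutable x/y accumulators by a row-wise recursion that
-- consumes two sections per call (objective: alternative decomposition, same cost).

-- ===== PORT A =====
-- t.get(k, d): first-match lookup in the association list (dict convention)
def pvLookup (t : List (String × String)) (k d : String) : String := ((t.lookup k).getD d)
-- literal transliteration of A; the loop's (elems, y, x) state is threaded through a foldl
def web_frame (title : String) (sections : Option (List String)) (theme : Option (List (String × String))) : List String × Int × Int :=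
  let w : Int := 1440
  let h : Int := 1024
  -- `theme or {}`: None and the empty dict both give {}
  let t : List (String × String) := theme.getD []
  let bg := pvLookup t "bg" "#0B1220"
  let surface := pvLookup t "surface" "#121A2A"
  let panel := pvLookup t "panel" "#0F172A"
  let text := pvLookup t "text" "#E5E7EB"
  let muted := pvLookup t "muted" "#94A3B8"
  let elems : List String := []
  let elems := elems ++ ["<rect x=\"0\" y=\"0\" width=\"" ++ PySem.Int.toStr w ++ "\" height=\"" ++ PySem.Int.toStr h ++ "\" fill=\"" ++ bg ++ "\"/>"]
  let elems := elems ++ ["<rect x=\"0\" y=\"0\" width=\"256\" height=\"" ++ PySem.Int.toStr h ++ "\" fill=\"" ++ panel ++ "\"/>"]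
  let elems := elems ++ ["<text x=\"24\" y=\"48\" fill=\"" ++ text ++ "\" font-size=\"18\" font-family=\"Inter\" font-weight=\"600\">Admin</text>"]
  let elems := elems ++ ["<rect x=\"256\" y=\"0\" width=\"" ++ PySem.Int.toStr (w - 256) ++ "\" height=\"64\" fill=\"" ++ surface ++ "\"/>"]
  let elems := elems ++ ["<text x=\"280\" y=\"40\" fill=\"" ++ text ++ "\" font-size=\"18\" font-family=\"Inter\" font-weight=\"600\">" ++ title ++ "</text>"]
  let y : Int := 88
  let x : Int := 280
  -- `if not sections:` — None and the empty list are both falsy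
  let secs0 : List String := sections.getD []
  let secs : List String :=
    if secs0.isEmpty then ["Primary panel", "Secondary panel", "Table / List", "Details / Inspector", "Actions"] else secs0
  -- sections[:6] with nonnegative bounds = take 6
  let st := (PySem.List.enumerate (secs.take 6)).foldl
    (fun (st : List String × Int × Int) (p : Int × String) =>
      let elems := st.1; let y := st.2.1; let x := st.2.2
      let _i := p.1; let s := p.2
      let elems := elems ++ ["<rect x=\"" ++ PySem.Int.toStr x ++ "\" y=\"" ++ PySem.Int.toStr y ++ "\" rx=\"12\" ry=\"12\" width=\"520\" height=\"200\" fill=\"" ++ surface ++ "\" stroke=\"#1F2A40\"/>"]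
      let elems := elems ++ ["<text x=\"" ++ PySem.Int.toStr (x + 16) ++ "\" y=\"" ++ PySem.Int.toStr (y + 36) ++ "\" fill=\"" ++ muted ++ "\" font-size=\"14\" font-family=\"Inter\">" ++ s ++ "</text>"]
      if PySem.Int.mod p.1 2 == 1 then (elems, y + 216, 280) else (elems, y, 824))
    (elems, y, x)
  (st.1, w, h)

-- ===== PORT B =====
-- card(x, y, s): the two element strings of one card
def webCard (surface muted : String) (x y : Int) (s : String) : List String :=
  ["<rect x=\"" ++ PySem.Int.toStr x ++ "\" y=\"" ++ PySem.Int.toStr y ++ "\" rx=\"12\" ry=\"12\" width=\"520\" height=\"200\" fill=\"" ++ surface ++ "\" stroke=\"#1F2A40\"/>",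
   "<text x=\"" ++ PySem.Int.toStr (x + 16) ++ "\" y=\"" ++ PySem.Int.toStr (y + 36) ++ "\" fill=\"" ++ muted ++ "\" font-size=\"14\" font-family=\"Inter\">" ++ s ++ "</text>"]

-- grid(rest, y): one grid ROW (up to two cards) per recursive call, Source B's `grid`
def webGrid (surface muted : String) : List String → Int → List String
  | [], _ => []
  | [s], y => webCard surface muted 280 y s
  | s :: s2 :: rest, y =>
      webCard surface muted 280 y s ++ webCard surface muted 824 y s2 ++ webGrid surface muted rest (y + 216)

def web_frame_alt (title : String) (sections : Option (List String)) (theme : Option (List (String × String))) : List String × Int × Int :=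
  let w : Int := 1440
  let h : Int := 1024
  let t : List (String × String) := theme.getD []
  let bg := pvLookup t "bg" "#0B1220"
  let surface := pvLookup t "surface" "#121A2A"
  let panel := pvLookup t "panel" "#0F172A"
  let text := pvLookup t "text" "#E5E7EB"
  let muted := pvLookup t "muted" "#94A3B8"
  let fixed : List String :=
    ["<rect x=\"0\" y=\"0\" width=\"" ++ PySem.Int.toStr w ++ "\" height=\"" ++ PySem.Int.toStr h ++ "\" fill=\"" ++ bg ++ "\"/>",
     "<rect x=\"0\" y=\"0\" width=\"256\" height=\"" ++ PySem.Int.toStr h ++ "\" fill=\"" ++ panel ++ "\"/>",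
     "<text x=\"24\" y=\"48\" fill=\"" ++ text ++ "\" font-size=\"18\" font-family=\"Inter\" font-weight=\"600\">Admin</text>",
     "<rect x=\"256\" y=\"0\" width=\"" ++ PySem.Int.toStr (w - 256) ++ "\" height=\"64\" fill=\"" ++ surface ++ "\"/>",
     "<text x=\"280\" y=\"40\" fill=\"" ++ text ++ "\" font-size=\"18\" font-family=\"Inter\" font-weight=\"600\">" ++ title ++ "</text>"]
  -- `if not sections:` — None and the empty list are both falsy
  let secs0 : List String := sections.getD []
  let secs : List String :=
    if secs0.isEmpty then ["Primary panel", "Secondary panel", "Table / List", "Details / Inspector", "Actions"] else secs0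
  (fixed ++ webGrid surface muted (secs.take 6) 88, w, h)

-- ===== PRECONDITION & SPEC =====
def Spec_web_frame (title : String) (sections : Option (List String)) (theme : Option (List (String × String))) (out : List String × Int × Int) : Prop := out = web_frame_alt title sections theme
instance (title : String) (sections : Option (List String)) (theme : Option (List (String × String))) (out : List String × Int × Int) : Decidable (Spec_web_frame title sections theme out) := by unfold Spec_web_frame; infer_instance

-- ===== CLAIM =====
def Claim_equal_web_frame : Prop := ∀ (title : String) (sections : Option (List String)) (theme : Option (List (String × String))), Dom_web_frame title sections theme → Spec_web_frame title sections theme (web_frame title sections theme)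

-- ===== LEMMAS AND PROOFS =====

-- the two ports agree for any truncated section list of length ≤ 6 (shown by cases on its shape)
set_option maxHeartbeats 2000000 in
theorem web_frame_eq_alt (title : String) (sections : Option (List String)) (theme : Option (List (String × String))) :
    web_frame title sections theme = web_frame_alt title sections theme := by
  unfold web_frame web_frame_alt
  rcases sections with _ | l
  · rfl
  · rcases l with _ | ⟨a, l⟩
    · rfl
    rcases l with _ | ⟨b, l⟩
    · rfl
    rcases l with _ | ⟨c, l⟩
    · rfl
    rcases l with _ | ⟨d, l⟩
    · rfl
    rcases l with _ | ⟨e, l⟩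
    · rfl
    rcases l with _ | ⟨f, l⟩ <;> rfl

-- ===== VERDICT =====
theorem web_frame_spec : Claim_equal_web_frame := by
  intro title sections theme _
  unfold Spec_web_frame
  exact web_frame_eq_alt title sections theme
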